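-- pv_equiv track=rewrite | github.com/bienchen/python-modelcif | ihm/reader.py | _get_codes
-- ===== SOURCE A (Python) =====
-- def _get_codes(codestr):
--     """Convert a one-letter-code string into a sequence of individual
--        codes"""
--     i = 0
--     while i < len(codestr):
--         # Strip out linebreaks
--         if codestr[i] == '\n':
--             pass
--         elif codestr[i] == '(':
--             end = codestr.index(')', i)
--             yield codestr[i+1:end]
--             i = end
--         else:
--             yield codestr[i]
--         i += 1
-- ===== SOURCE B (Python) =====
-- def _get_codes(codestr):
--     """Convert a one-letter-code string into a sequence of individual
--        codes"""
--     inside = False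
--     buf = ""
--     for c in codestr:
--         if inside:
--             if c == ')':
--                 yield buf
--                 buf = ""
--                 inside = False
--             else:
--                 buf += c
--         else:
--             if c == '\n':
--                 continue
--             elif c == '(':
--                 inside = True
--             else:
--                 yield c
--     if inside:
--         raise ValueError("unterminated '(' in one-letter-code string")
-- ===== Notes on version B (the rewrite author's own statement) =====
-- stated objective: idiomatic
-- what changed: Replaced index-jumping with str.index/slicing by a single for-loop state machine (inside flag + growing buffer) that emits each code as it is completed.
-- outside the precondition, e.g. on _get_codes('('): A raises ValueError, B raises ValueError
import Mathlib
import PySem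

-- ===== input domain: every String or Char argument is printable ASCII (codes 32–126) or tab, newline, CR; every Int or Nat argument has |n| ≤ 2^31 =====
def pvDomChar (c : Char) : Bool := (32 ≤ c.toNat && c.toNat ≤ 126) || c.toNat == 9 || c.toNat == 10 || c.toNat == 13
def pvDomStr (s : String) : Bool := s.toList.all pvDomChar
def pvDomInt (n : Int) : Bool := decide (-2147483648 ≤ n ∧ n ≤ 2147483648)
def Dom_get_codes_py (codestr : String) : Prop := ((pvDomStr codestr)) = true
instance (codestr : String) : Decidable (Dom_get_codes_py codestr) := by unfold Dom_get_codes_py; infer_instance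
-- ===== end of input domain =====

-- B replaces A's index-jumping/str.index/slicing scan by a single-pass state machine
-- (inside-parentheses flag + growing buffer); same O(n) cost, more idiomatic.

-- ===== PORT A =====
-- codestr.index(c, i): exact for 0 ≤ i ≤ len; none = ValueError (excluded by Pre_)
def pyIndexFrom (cs : List Char) (c : Char) (i : Nat) : Option Nat :=
  (PySem.List.index? (cs.drop i) c).map (i + ·)

def getCodesAux (cs : List Char) (i : Nat) : List String :=
  if h : i < cs.length then
    if cs[i] = '\n' then getCodesAux cs (i+1)
    else if cs[i] = '(' then
      match h' : pyIndexFrom cs ')' i with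
      | none => []   -- A raises ValueError here; these inputs are outside Pre_
      | some e => String.mk ((cs.take e).drop (i+1)) :: getCodesAux cs (e+1)
    else String.mk [cs[i]] :: getCodesAux cs (i+1)
  else []
termination_by cs.length - i
decreasing_by
  · omega
  · simp only [pyIndexFrom, Option.map_eq_some_iff] at h'
    obtain ⟨k, -, rfl⟩ := h'
    omega
  · omega

def get_codes_py (codestr : String) : List String :=
  getCodesAux codestr.toList 0

-- ===== PORT B =====
def altLoop (cs : List Char) (inside : Bool) (buf : List Char) : List String :=
  match cs with
  | [] => []   -- Python B raises ValueError if still inside; those inputs are outside Pre_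
  | c :: rest =>
    if inside then
      if c = ')' then String.mk buf :: altLoop rest false []
      else altLoop rest true (buf ++ [c])
    else
      if c = '\n' then altLoop rest false buf
      else if c = '(' then altLoop rest true buf
      else String.mk [c] :: altLoop rest false buf

def get_codes_py_alt (codestr : String) : List String :=
  altLoop codestr.toList false []

-- ===== PRECONDITION & SPEC =====
-- Pre_ excludes strings containing an unterminated parenthesized group: there A
-- raises ValueError (str.index fails) and B raises ValueError as well.
def Pre_get_codes_py (codestr : String) : Prop :=
  ∀ i ∈ List.range codestr.toList.length,
    codestr.toList[i]! = '(' → ')' ∈ codestr.toList.drop (i+1)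
instance (codestr : String) : Decidable (Pre_get_codes_py codestr) := by
  unfold Pre_get_codes_py; infer_instance

def pvWitness_get_codes_py : String := "AB(MSE)C\nD()"

def Spec_get_codes_py (codestr : String) (out : List String) : Prop := out = get_codes_py_alt codestr
instance (codestr : String) (out : List String) : Decidable (Spec_get_codes_py codestr out) := by unfold Spec_get_codes_py; infer_instance

-- ===== CLAIM (what is proved, stated in full; the proofs are below) =====
def Claim_equal_get_codes_py : Prop := ∀ (codestr : String), Dom_get_codes_py codestr → Pre_get_codes_py codestr → Spec_get_codes_py codestr (get_codes_py codestr)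

-- ===== LEMMAS AND PROOFS =====

-- B's loop in inside-mode consumes up to the first closing paren, emitting buf ++ prefix.
lemma altLoop_inside (suf : List Char) : ∀ (pre buf : List Char), ')' ∉ pre →
    altLoop (pre ++ ')' :: suf) true buf = String.mk (buf ++ pre) :: altLoop suf false [] := by
  intro pre
  induction pre with
  | nil => intro buf _; simp [altLoop]
  | cons c t ih =>
    intro buf hc
    have hcne : ¬ c = ')' := fun h => hc (by simp [h])
    simp only [List.cons_append, altLoop, if_pos, if_neg hcne]
    rw [ih (buf ++ [c]) (fun h => hc (by simp [h]))]
    simp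

lemma main_lemma (cs : List Char)
    (hP : ∀ j (hj : j < cs.length), cs[j] = '(' → ')' ∈ cs.drop (j+1)) :
    ∀ n i, cs.length - i ≤ n → getCodesAux cs i = altLoop (cs.drop i) false [] := by
  intro n
  induction n with
  | zero =>
    intro i hi
    rw [getCodesAux, dif_neg (by omega), List.drop_eq_nil_of_le (by omega)]
    rfl
  | succ n ih =>
    intro i hi
    by_cases h : i < cs.length
    · have hdrop : cs.drop i = cs[i] :: cs.drop (i+1) := List.drop_eq_getElem_cons h
      rw [getCodesAux, dif_pos h]
      by_cases h1 : cs[i] = '\n'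
      · rw [if_pos h1, hdrop, h1]
        simp only [altLoop, reduceIte]
        exact ih (i+1) (by omega)
      · by_cases h2 : cs[i] = '('
        · have hmem : ')' ∈ cs.drop (i+1) := hP i h h2
          obtain ⟨k, hk⟩ := Option.isSome_iff_exists.mp
            ((PySem.List.index?_isSome_iff (cs.drop (i+1)) ')').mpr hmem)
          obtain ⟨pre, suf, hdec, hlen, hnot⟩ := (PySem.List.index?_eq_some_iff _ _ _).mp hk
          have hidx : pyIndexFrom cs ')' i = some (i + (k+1)) := by
            unfold pyIndexFrom
            rw [hdrop, h2, PySem.List.index?_cons_of_ne _ (by decide), hk]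
            rfl
          rw [if_neg h1, if_pos h2]
          split
          · next heq => rw [hidx] at heq; cases heq
          · next e heq =>
            rw [hidx] at heq
            injection heq with he
            subst he
            have hslice : (cs.take (i + (k+1))).drop (i+1) = pre := by
              rw [List.drop_take, hdec, show i + (k+1) - (i+1) = k by omega,
                  ← hlen, List.take_left]
            have hdec' : cs.drop (i+1) = (pre ++ [')']) ++ suf := by
              rw [hdec]; simp
            have hsuf : cs.drop (i + (k+1) + 1) = suf := by
              rw [show i + (k+1) + 1 = (i+1) + (k+1) by omega, ← List.drop_drop, hdec',
                  List.drop_left' (by simp [hlen])]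
            rw [hslice, hdrop, h2, hdec]
            simp only [altLoop, if_neg (by decide : ¬ (false = true)),
              if_neg (by decide : ¬ ('(' = '\n'))]
            rw [altLoop_inside suf pre [] hnot, List.nil_append]
            rw [ih (i + (k+1) + 1) (by omega), hsuf]
            simp
        · rw [if_neg h1, if_neg h2, hdrop]
          simp only [altLoop, if_neg (by decide : ¬ (false = true)), if_neg h1, if_neg h2]
          rw [ih (i+1) (by omega)]
    · rw [getCodesAux, dif_neg h, List.drop_eq_nil_of_le (by omega)]
      rfl

theorem get_codes_py_spec_aux (codestr : String) (hpre : Pre_get_codes_py codestr) :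
    get_codes_py codestr = get_codes_py_alt codestr := by
  unfold get_codes_py get_codes_py_alt
  
  exact main_lemma codestr.toList
    (fun j hj hj2 => hpre j (List.mem_range.mpr hj) (by rw [List.getElem!_eq_getElem?_getD, List.getElem?_eq_getElem hj]; exact hj2))
    codestr.toList.length 0 (by omega) |>.trans (by rw [List.drop_zero])

-- ===== VERDICT (by name: the statement is the Claim_ definition above) =====
theorem get_codes_py_spec : Claim_equal_get_codes_py := by
  intro s _ hpre
  exact get_codes_py_spec_aux s hpre
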